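-- pv_equiv track=rewrite | github.com/engenmt/permpy | permpy/statistics.py | noninversions
-- ===== SOURCE A (Python) =====
-- def noninversions(perm):
--     p = list(perm)
--     n = perm.__len__()
--     inv = 0
--     for i in range(n):
--         for j in range(i+1,n):
--             if p[i]<p[j]:
--                 inv+=1
--     return inv
-- ===== SOURCE B (Python) =====
-- def noninversions(perm):
--     def msort(xs):
--         n = len(xs)
--         if n <= 1:
--             return 0, xs
--         m = n // 2
--         c1, left = msort(xs[:m])
--         c2, right = msort(xs[m:])
--         cross = 0
--         merged = []
--         i = j = 0
--         while i < len(left) and j < len(right):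
--             if left[i] < right[j]:
--                 cross += len(right) - j
--                 merged.append(left[i])
--                 i += 1
--             else:
--                 merged.append(right[j])
--                 j += 1
--         merged.extend(left[i:])
--         merged.extend(right[j:])
--         return c1 + c2 + cross, merged
--     c, _ = msort(list(perm))
--     return c
-- ===== Notes on version B (the rewrite author's own statement) =====
-- stated objective: faster
-- what changed: Replaced A's nested index loops (compare every pair) by a merge sort that counts the increasing cross pairs during each merge step.
import Mathlib
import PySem

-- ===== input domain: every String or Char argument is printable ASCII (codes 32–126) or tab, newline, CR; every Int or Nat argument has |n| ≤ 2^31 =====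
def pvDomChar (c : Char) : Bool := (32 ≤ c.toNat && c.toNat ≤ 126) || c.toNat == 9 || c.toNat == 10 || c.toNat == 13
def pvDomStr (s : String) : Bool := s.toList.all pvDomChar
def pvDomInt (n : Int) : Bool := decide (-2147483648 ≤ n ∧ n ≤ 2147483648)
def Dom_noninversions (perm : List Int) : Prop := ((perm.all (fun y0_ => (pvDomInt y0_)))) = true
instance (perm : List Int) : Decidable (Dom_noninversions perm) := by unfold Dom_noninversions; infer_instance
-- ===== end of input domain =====

-- B replaces A's quadratic double loop by merge-sort counting of increasing pairs (objective: faster, O(n log n)).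

-- ===== PORT A =====
def noninversions (perm : List Int) : Int :=
  let p := perm
  let n : Int := perm.length
  (PySem.List.pyRange 0 n 1).foldl (fun inv i =>
    (PySem.List.pyRange (i + 1) n 1).foldl (fun inv j =>
      if PySem.List.pyGetD p i 0 < PySem.List.pyGetD p j 0 then inv + 1 else inv) inv) 0

-- ===== PORT B =====
-- merge step of Source B's msort: returns (number of increasing cross pairs, merged list);
-- 'cross += len(right) - j' = remaining length of the right run.
def mergeCnt : List Int → List Int → Int × List Int
  | [], ys => (0, ys)
  | x :: xs, [] => (0, x :: xs)
  | x :: xs, y :: ys =>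
    if x < y then
      let r := mergeCnt xs (y :: ys)
      (r.1 + ((ys.length : Int) + 1), x :: r.2)
    else
      let r := mergeCnt (x :: xs) ys
      (r.1, y :: r.2)
termination_by L R => L.length + R.length

def msortCnt (xs : List Int) : Int × List Int :=
  if xs.length ≤ 1 then (0, xs)
  else
    let m := xs.length / 2
    let r1 := msortCnt (xs.take m)
    let r2 := msortCnt (xs.drop m)
    let r3 := mergeCnt r1.2 r2.2
    (r1.1 + r2.1 + r3.1, r3.2)
termination_by xs.length
decreasing_by
  · simp only [List.length_take]; omega
  · simp only [List.length_drop]; omega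

def noninversions_alt (perm : List Int) : Int := (msortCnt perm).1

-- ===== PRECONDITION & SPEC =====
def Spec_noninversions (perm : List Int) (out : Int) : Prop := out = noninversions_alt perm
instance (perm : List Int) (out : Int) : Decidable (Spec_noninversions perm out) := by unfold Spec_noninversions; infer_instance

-- ===== CLAIM (what is proved, stated in full; the proofs are below) =====
def Claim_equal_noninversions : Prop := ∀ (perm : List Int), Dom_noninversions perm → Spec_noninversions perm (noninversions perm)

-- ===== LEMMAS AND PROOFS =====

-- number of pairs i < j with p i < p j, structurally
def cnt : List Int → Nat
  | [] => 0
  | a :: t => t.countP (fun b => decide (a < b)) + cnt t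

-- number of increasing pairs across two blocks
def cross (L R : List Int) : Nat := (L.map (fun a => R.countP (fun b => decide (a < b)))).sum

lemma inner_loop (p : List Int) (x : Int) :
    ∀ (k j : Nat) (acc : Int), p.length - j = k → j ≤ p.length →
    (PySem.List.pyRange (j : Int) (p.length : Int) 1).foldl
      (fun inv jj => if x < PySem.List.pyGetD p jj 0 then inv + 1 else inv) acc
    = acc + (((p.drop j).countP (fun b => decide (x < b)) : Int)) := by
  intro k
  induction k with
  | zero =>
    intro j acc hk hle
    have hj : j = p.length := by omega
    subst hj
    rw [PySem.List.pyRange_one_eq_nil (by exact_mod_cast le_refl _)]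
    simp
  | succ k ih =>
    intro j acc hk hle
    have hj : j < p.length := by omega
    rw [PySem.List.pyRange_one_cons (by exact_mod_cast hj)]
    simp only [List.foldl_cons]
    have hcast : ((j : Int) + 1) = ((j + 1 : Nat) : Int) := by push_cast; ring
    rw [hcast, ih (j + 1) _ (by omega) (by omega)]
    have hdrop : p.drop j = p[j] :: p.drop (j + 1) := List.drop_eq_getElem_cons hj
    have hget : PySem.List.pyGetD p (j : Int) 0 = p[j] := by
      rw [PySem.List.pyGetD_natCast, List.getD_eq_getElem _ _ hj]
    rw [hget, hdrop, List.countP_cons]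
    by_cases hx : x < p[j] <;> simp [hx] <;> ring
lemma outer_loop (p : List Int) :
    ∀ (k i : Nat) (acc : Int), p.length - i = k → i ≤ p.length →
    (PySem.List.pyRange (i : Int) (p.length : Int) 1).foldl
      (fun inv ii =>
        (PySem.List.pyRange (ii + 1) (p.length : Int) 1).foldl
          (fun inv jj => if PySem.List.pyGetD p ii 0 < PySem.List.pyGetD p jj 0 then inv + 1 else inv) inv) acc
    = acc + (cnt (p.drop i) : Int) := by
  intro k
  induction k with
  | zero =>
    intro i acc hk hle
    have hi : i = p.length := by omega
    subst hi
    rw [PySem.List.pyRange_one_eq_nil (by exact_mod_cast le_refl _)]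
    simp [cnt]
  | succ k ih =>
    intro i acc hk hle
    have hi : i < p.length := by omega
    rw [PySem.List.pyRange_one_cons (by exact_mod_cast hi)]
    simp only [List.foldl_cons]
    have hcast : ((i : Int) + 1) = ((i + 1 : Nat) : Int) := by push_cast; ring
    rw [hcast, ih (i + 1) _ (by omega) (by omega),
        inner_loop p _ (p.length - (i + 1)) (i + 1) acc rfl (by omega)]
    have hdrop : p.drop i = p[i] :: p.drop (i + 1) := List.drop_eq_getElem_cons hi
    have hget : PySem.List.pyGetD p (i : Int) 0 = p[i] := by
      rw [PySem.List.pyGetD_natCast, List.getD_eq_getElem _ _ hi]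
    rw [hget, hdrop]
    simp [cnt]
    ring

lemma A_eq_cnt (p : List Int) : noninversions p = (cnt p : Int) := by
  have h := outer_loop p p.length 0 0 (by omega) (by omega)
  simpa [noninversions] using h

lemma mergeCnt_perm : ∀ (L R : List Int), (mergeCnt L R).2.Perm (L ++ R) := by
  intro L
  induction L with
  | nil => intro R; simp [mergeCnt]
  | cons x xs ihL =>
    intro R
    induction R with
    | nil => simp [mergeCnt]
    | cons y ys ihR =>
      rw [mergeCnt]
      by_cases h : x < y
      · simp only [h, if_true]
        exact ((ihL (y :: ys)).cons x)
      · simp only [h, if_false]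
        exact (ihR.cons y).trans List.perm_middle.symm

lemma mergeCnt_sorted : ∀ (L R : List Int), L.Pairwise (· ≤ ·) → R.Pairwise (· ≤ ·) →
    (mergeCnt L R).2.Pairwise (· ≤ ·) := by
  intro L
  induction L with
  | nil => intro R _ hR; simpa [mergeCnt] using hR
  | cons x xs ihL =>
    intro R hL hR
    induction R with
    | nil => simpa [mergeCnt] using hL
    | cons y ys ihR =>
      rw [mergeCnt]
      rcases List.pairwise_cons.mp hL with ⟨hxxs, hxs⟩
      rcases List.pairwise_cons.mp hR with ⟨hyys, hys⟩
      by_cases h : x < y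
      · simp only [h, if_true]
        refine List.pairwise_cons.mpr ⟨?_, ihL (y :: ys) hxs hR⟩
        intro b hb
        have hb' : b ∈ xs ++ y :: ys := (mergeCnt_perm xs (y :: ys)).mem_iff.mp hb
        rcases List.mem_append.mp hb' with hb1 | hb2
        · exact hxxs b hb1
        · rcases List.mem_cons.mp hb2 with rfl | hb3
          · exact le_of_lt h
          · exact le_trans (le_of_lt h) (hyys b hb3)
      · simp only [h, if_false]
        refine List.pairwise_cons.mpr ⟨?_, ihR hys⟩
        intro b hb
        have hb' : b ∈ (x :: xs) ++ ys := (mergeCnt_perm (x :: xs) ys).mem_iff.mp hb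
        have hyx : y ≤ x := le_of_not_gt h
        rcases List.mem_append.mp hb' with hb1 | hb2
        · rcases List.mem_cons.mp hb1 with rfl | hb3
          · exact hyx
          · exact le_trans hyx (hxxs b hb3)
        · exact hyys b hb2

lemma cross_nil_right (L : List Int) : cross L [] = 0 := by
  simp [cross]

lemma mergeCnt_fst : ∀ (L R : List Int), L.Pairwise (· ≤ ·) → R.Pairwise (· ≤ ·) →
    (mergeCnt L R).1 = (cross L R : Int) := by
  intro L
  induction L with
  | nil => intro R _ _; simp [mergeCnt, cross]
  | cons x xs ihL =>
    intro R hL hR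
    induction R with
    | nil => simp [mergeCnt, cross_nil_right]
    | cons y ys ihR =>
      rw [mergeCnt]
      rcases List.pairwise_cons.mp hL with ⟨hxxs, hxs⟩
      rcases List.pairwise_cons.mp hR with ⟨hyys, hys⟩
      by_cases h : x < y
      · simp only [h, if_true]
        rw [ihL (y :: ys) hxs hR]
        have hcount : (y :: ys).countP (fun b => decide (x < b)) = (y :: ys).length := by
          rw [List.countP_eq_length]
          intro b hb
          rcases List.mem_cons.mp hb with rfl | hb2
          · exact decide_eq_true h
          · exact decide_eq_true (lt_of_lt_of_le h (hyys b hb2))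
        simp only [cross, List.map_cons, List.sum_cons, hcount, List.length_cons]
        push_cast
        ring
      · simp only [h, if_false]
        rw [ihR hys]
        have : cross (x :: xs) (y :: ys) = cross (x :: xs) ys := by
          unfold cross
          congr 1
          apply List.map_congr_left
          intro a ha
          have hay : ¬ a < y := by
            have hxa : x ≤ a := by
              rcases List.mem_cons.mp ha with rfl | ha2
              · exact le_refl a
              · exact hxxs a ha2
            have hyx : y ≤ x := le_of_not_gt h
            omega
          rw [List.countP_cons]
          simp [hay]
        rw [this]

lemma cross_perm_left {L L' : List Int} (R : List Int) (h : L.Perm L') : cross L R = cross L' R := by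
  unfold cross
  exact (h.map _).sum_eq

lemma cross_perm_right (L : List Int) {R R' : List Int} (h : R.Perm R') : cross L R = cross L R' := by
  unfold cross
  congr 1
  apply List.map_congr_left
  intro a _
  exact h.countP_eq _

lemma cnt_append : ∀ (L R : List Int), cnt (L ++ R) = cnt L + cnt R + cross L R := by
  intro L R
  induction L with
  | nil => simp [cnt, cross]
  | cons a L' ih =>
    simp only [List.cons_append, cnt, List.countP_append, ih, cross, List.map_cons, List.sum_cons]
    ring

lemma msortCnt_spec : ∀ (n : Nat) (xs : List Int), xs.length = n →
    (msortCnt xs).1 = (cnt xs : Int) ∧ (msortCnt xs).2.Perm xs ∧ (msortCnt xs).2.Pairwise (· ≤ ·) := by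
  intro n
  induction n using Nat.strong_induction_on with
  | _ n ih =>
    intro xs hn
    rw [msortCnt]
    by_cases hsmall : xs.length ≤ 1
    · simp only [hsmall, if_true]
      match xs, hsmall with
      | [], _ => simp [cnt]
      | [a], _ => simp [cnt]
    · simp only [hsmall, if_false]
      have hlen : 2 ≤ xs.length := by omega
      set m := xs.length / 2 with hm
      have htake : (xs.take m).length = m := by
        rw [List.length_take]; omega
      have hdrop : (xs.drop m).length = xs.length - m := by
        rw [List.length_drop]
      obtain ⟨h1f, h1p, h1s⟩ := ih (xs.take m).length (by omega) (xs.take m) rfl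
      obtain ⟨h2f, h2p, h2s⟩ := ih (xs.drop m).length (by omega) (xs.drop m) rfl
      refine ⟨?_, ?_, ?_⟩
      · rw [h1f, h2f, mergeCnt_fst _ _ h1s h2s,
            cross_perm_left _ h1p, cross_perm_right _ h2p]
        have : cnt xs = cnt (xs.take m) + cnt (xs.drop m) + cross (xs.take m) (xs.drop m) := by
          conv_lhs => rw [← List.take_append_drop m xs]
          exact cnt_append _ _
        rw [this]
        push_cast
        ring
      · exact ((mergeCnt_perm _ _).trans (h1p.append h2p)).trans
          (by rw [List.take_append_drop])
      · exact mergeCnt_sorted _ _ h1s h2s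

lemma B_eq_cnt (p : List Int) : noninversions_alt p = (cnt p : Int) :=
  (msortCnt_spec p.length p rfl).1

-- ===== VERDICT (by name: the statement is the Claim_ definition above) =====
theorem noninversions_spec : Claim_equal_noninversions := by
  intro perm _
  unfold Spec_noninversions
  rw [A_eq_cnt, B_eq_cnt]
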